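-- pv_equiv track=rewrite | github.com/yeager/ddtp-translate | src/ddtp_translate/ddtp_api.py | parse_ddtp_response
-- ===== SOURCE A (Python) =====
-- def parse_ddtp_response(text):
--     """Parse DDTP ddt.cgi response into list of package dicts.
--
--     Response format (one per package, separated by blank lines):
--         Package: <name>
--         Description-md5: <hash>
--         Description-en: <short description>
--          <long description line 1>
--          <long description line 2>
--          .
--     """
--     packages = []
--     current = None
--
--     for line in text.splitlines():
--         if line.startswith("Package: "):
--             if current:
--                 packages.append(current)
--             current = {
--                 "package": line[9:].strip(),
--                 "md5": "",
--                 "short": "",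
--                 "long": "",
--             }
--         elif line.startswith("Description-md5: ") and current:
--             current["md5"] = line[17:].strip()
--         elif line.startswith("Description-en: ") and current:
--             current["short"] = line[16:].strip()
--         elif current and (line.startswith(" ") or line.startswith("\t")):
--             stripped = line.strip()
--             if stripped == ".":
--                 current["long"] += "\n"
--             else:
--                 if current["long"]:
--                     current["long"] += "\n"
--                 current["long"] += stripped
--
--     if current:
--         packages.append(current)
--
--     return packages
-- ===== SOURCE B (Python) =====
-- def parse_ddtp_response(text):
--     """Parse DDTP ddt.cgi response into list of package dicts.
--
--     Two-phase: first partition the lines into groups, each starting at a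
--     'Package: ' header (lines before the first header are dropped), then
--     build one dict per group from its header and body lines.
--     """
--     lines = text.splitlines()
--     groups = []
--     i, n = 0, len(lines)
--     while i < n:
--         if lines[i].startswith("Package: "):
--             j = i + 1
--             while j < n and not lines[j].startswith("Package: "):
--                 j += 1
--             groups.append((lines[i], lines[i + 1:j]))
--             i = j
--         else:
--             i += 1
--     packages = []
--     for header, body in groups:
--         md5 = short = long_desc = ""
--         for line in body:
--             if line.startswith("Description-md5: "):
--                 md5 = line[17:].strip()
--             elif line.startswith("Description-en: "):
--                 short = line[16:].strip()
--             elif line.startswith(" ") or line.startswith("\t"):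
--                 stripped = line.strip()
--                 if stripped == ".":
--                     long_desc += "\n"
--                 elif long_desc == "":
--                     long_desc = stripped
--                 else:
--                     long_desc += "\n" + stripped
--         packages.append({"package": header[9:].strip(),
--                          "md5": md5, "short": short, "long": long_desc})
--     return packages
-- ===== Notes on version B (the rewrite author's own statement) =====
-- stated objective: alternative
-- what changed: Replaces A's single-pass fold that threads an optional current dict through every line with a two-phase decomposition: first partition the lines into groups starting at 'Package: ' headers (dropping any leading non-header lines), then build each package dict independently from its group's header and body.
import Mathlib
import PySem

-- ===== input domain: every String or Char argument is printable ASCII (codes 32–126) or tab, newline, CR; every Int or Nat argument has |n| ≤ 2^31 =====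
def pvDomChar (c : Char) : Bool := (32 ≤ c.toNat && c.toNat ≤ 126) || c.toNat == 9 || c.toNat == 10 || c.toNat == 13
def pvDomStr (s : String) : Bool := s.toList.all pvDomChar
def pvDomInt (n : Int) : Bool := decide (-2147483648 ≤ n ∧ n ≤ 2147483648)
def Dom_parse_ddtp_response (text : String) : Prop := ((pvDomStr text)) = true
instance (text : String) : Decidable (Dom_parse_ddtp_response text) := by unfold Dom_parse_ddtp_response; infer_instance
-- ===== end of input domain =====

-- B replaces A's one-pass fold (optional current dict threaded through the lines) by a
-- two-phase decomposition: partition lines into 'Package: ' groups, then build each dict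
-- from its own group (objective: alternative; same O(n) cost).

-- ===== PORT A =====
-- A's loop step: state = (packages so far, optional current dict).
-- Python's 'if current:' is truth on a dict; here current is always a 4-entry dict when
-- present, so 'some _' is exactly truthy.
def pvStepA (st : List (PySem.Dict String String) × Option (PySem.Dict String String))
    (line : String) : List (PySem.Dict String String) × Option (PySem.Dict String String) :=
  let packages := st.1
  let current := st.2
  if PySem.Str.startswith line "Package: " then
    ((match current with
      | some c => packages ++ [c]
      | none => packages),
     some (PySem.Dict.mk
       [("package", PySem.Str.strip (PySem.Str.slice line (some 9) none)),
        ("md5", ""), ("short", ""), ("long", "")]))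
  else if PySem.Str.startswith line "Description-md5: " then
    match current with
    | some c => (packages, some (c.insert "md5" (PySem.Str.strip (PySem.Str.slice line (some 17) none))))
    | none => (packages, none)
  else if PySem.Str.startswith line "Description-en: " then
    match current with
    | some c => (packages, some (c.insert "short" (PySem.Str.strip (PySem.Str.slice line (some 16) none))))
    | none => (packages, none)
  else if PySem.Str.startswith line " " || PySem.Str.startswith line "\t" then
    match current with
    | some c =>
      let stripped := PySem.Str.strip line
      if stripped == "." then
        (packages, some (c.insert "long" (c.getD "long" "" ++ "\n")))
      else
        let c1 := if c.getD "long" "" == "" then c else c.insert "long" (c.getD "long" "" ++ "\n")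
        (packages, some (c1.insert "long" (c1.getD "long" "" ++ stripped)))
    | none => (packages, none)
  else (packages, current)

def parse_ddtp_response (text : String) : List (List (String × String)) :=
  match (PySem.Str.splitlines text).foldl pvStepA ([], none) with
  | (packages, some c) => (packages ++ [c]).map PySem.Dict.items
  | (packages, none) => packages.map PySem.Dict.items

-- ===== PORT B =====
def pvIsHeader (line : String) : Bool := PySem.Str.startswith line "Package: "

-- B's phase 1: partition the lines into (header, body) groups; the body of a group is the
-- run of non-header lines after its header (B's inner j-scan = takeWhile/dropWhile).
def pvGroupsB : List String → List (String × List String)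
  | [] => []
  | l :: ls =>
    if pvIsHeader l then
      (l, ls.takeWhile (fun x => !pvIsHeader x)) :: pvGroupsB (ls.dropWhile (fun x => !pvIsHeader x))
    else pvGroupsB ls
termination_by ls => ls.length
decreasing_by
· exact Nat.lt_succ_of_le (List.length_dropWhile_le _ _)
· exact Nat.lt_succ_of_le (Nat.le_refl _)

-- B's inner loop over a group's body: state = (md5, short, long_desc).
def pvBuildStep (acc : String × String × String) (line : String) : String × String × String :=
  if PySem.Str.startswith line "Description-md5: " then
    (PySem.Str.strip (PySem.Str.slice line (some 17) none), acc.2.1, acc.2.2)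
  else if PySem.Str.startswith line "Description-en: " then
    (acc.1, PySem.Str.strip (PySem.Str.slice line (some 16) none), acc.2.2)
  else if PySem.Str.startswith line " " || PySem.Str.startswith line "\t" then
    let stripped := PySem.Str.strip line
    if stripped == "." then (acc.1, acc.2.1, acc.2.2 ++ "\n")
    else if acc.2.2 == "" then (acc.1, acc.2.1, stripped)
    else (acc.1, acc.2.1, acc.2.2 ++ "\n" ++ stripped)
  else acc

def pvBuildPkg (g : String × List String) : List (String × String) :=
  let r := g.2.foldl pvBuildStep ("", "", "")
  [("package", PySem.Str.strip (PySem.Str.slice g.1 (some 9) none)),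
   ("md5", r.1), ("short", r.2.1), ("long", r.2.2)]

def parse_ddtp_response_alt (text : String) : List (List (String × String)) :=
  (pvGroupsB (PySem.Str.splitlines text)).map pvBuildPkg

-- ===== PRECONDITION & SPEC =====
def Spec_parse_ddtp_response (text : String) (out : List (List (String × String))) : Prop := out = parse_ddtp_response_alt text
instance (text : String) (out : List (List (String × String))) : Decidable (Spec_parse_ddtp_response text out) := by unfold Spec_parse_ddtp_response; infer_instance

-- ===== CLAIM (what is proved, stated in full; the proofs are below) =====
def Claim_equal_parse_ddtp_response : Prop := ∀ (text : String), Dom_parse_ddtp_response text → Spec_parse_ddtp_response text (parse_ddtp_response text)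

-- ===== LEMMAS AND PROOFS =====

-- The canonical shape of A's current dict: always exactly these four keys in this order.
def pvMk (p m s l : String) : PySem.Dict String String :=
  PySem.Dict.mk [("package", p), ("md5", m), ("short", s), ("long", l)]

def pvMkPkg (g : String × List String) : PySem.Dict String String :=
  pvMk (PySem.Str.strip (PySem.Str.slice g.1 (some 9) none))
    (g.2.foldl pvBuildStep ("", "", "")).1
    (g.2.foldl pvBuildStep ("", "", "")).2.1
    (g.2.foldl pvBuildStep ("", "", "")).2.2

def pvFinish (st : List (PySem.Dict String String) × Option (PySem.Dict String String)) :
    List (PySem.Dict String String) :=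
  match st.2 with
  | some c => st.1 ++ [c]
  | none => st.1

theorem pvStepA_none (acc : List (PySem.Dict String String)) (line : String)
    (h : pvIsHeader line = false) : pvStepA (acc, none) line = (acc, none) := by
  simp only [pvIsHeader] at h
  unfold pvStepA
  simp only [h, Bool.false_eq_true, if_false]
  split_ifs <;> rfl

theorem pvStepA_header (acc : List (PySem.Dict String String))
    (cur : Option (PySem.Dict String String)) (line : String)
    (h : pvIsHeader line = true) :
    pvStepA (acc, cur) line =
      ((match cur with | some c => acc ++ [c] | none => acc),
       some (pvMk (PySem.Str.strip (PySem.Str.slice line (some 9) none)) "" "" "")) := by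
  simp only [pvIsHeader] at h
  simp at h
  unfold pvStepA pvMk
  simp [h]

-- One non-header line acting on a canonical current dict is exactly B's build step.
theorem pvStepA_body (acc : List (PySem.Dict String String)) (p m s l line : String)
    (h : pvIsHeader line = false) :
    pvStepA (acc, some (pvMk p m s l)) line =
      (acc, some (pvMk p (pvBuildStep (m, s, l) line).1 (pvBuildStep (m, s, l) line).2.1
        (pvBuildStep (m, s, l) line).2.2)) := by
  simp only [pvIsHeader] at h
  unfold pvStepA pvBuildStep
  simp only [h, Bool.false_eq_true, if_false]
  split_ifs with h1 h2 h3 h4 h5 <;>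
    simp_all [pvMk, PySem.Dict.insert, PySem.Dict.getD, PySem.Dict.get?, String.append_assoc]

-- A's fold continued from an open group: the open group is finished by B's build fold
-- over the run of non-header lines, and the rest are B's groups.
theorem pvMain2 (ls : List String) : ∀ (acc : List (PySem.Dict String String)) (p m s l : String),
    pvFinish (ls.foldl pvStepA (acc, some (pvMk p m s l))) =
      acc ++ pvMk p ((ls.takeWhile (fun x => !pvIsHeader x)).foldl pvBuildStep (m, s, l)).1
          ((ls.takeWhile (fun x => !pvIsHeader x)).foldl pvBuildStep (m, s, l)).2.1
          ((ls.takeWhile (fun x => !pvIsHeader x)).foldl pvBuildStep (m, s, l)).2.2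
        :: (pvGroupsB (ls.dropWhile (fun x => !pvIsHeader x))).map pvMkPkg := by
  induction ls with
  | nil => intro acc p m s l; simp [pvFinish, pvGroupsB]
  | cons x xs ih =>
    intro acc p m s l
    by_cases hx : pvIsHeader x = true
    · rw [List.foldl_cons, pvStepA_header _ _ _ hx, ih]
      conv_rhs => rw [pvGroupsB.eq_def]
      simp [hx, pvMkPkg]
    · have hx' : pvIsHeader x = false := by simpa using hx
      rw [List.foldl_cons, pvStepA_body _ _ _ _ _ _ hx', ih]
      simp [hx']

-- Main invariant: from a flushed state, A's remaining fold produces exactly B's groups.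
theorem pvMain (lines : List String) : ∀ (acc : List (PySem.Dict String String)),
    pvFinish (lines.foldl pvStepA (acc, none)) = acc ++ (pvGroupsB lines).map pvMkPkg := by
  induction lines with
  | nil => intro acc; simp [pvFinish, pvGroupsB]
  | cons l ls ih =>
    intro acc
    by_cases hl : pvIsHeader l = true
    · rw [List.foldl_cons, pvStepA_header _ _ _ hl, pvMain2]
      conv_rhs => rw [pvGroupsB.eq_def]
      simp [hl, pvMkPkg]
    · have hl' : pvIsHeader l = false := by simpa using hl
      rw [List.foldl_cons, pvStepA_none _ _ hl', ih]
      conv_rhs => rw [pvGroupsB.eq_def]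
      simp [hl']

theorem pvItems (g : String × List String) : (pvMkPkg g).items = pvBuildPkg g := rfl

-- ===== VERDICT (by name: the statement is the Claim_ definition above) =====
theorem parse_ddtp_response_spec : Claim_equal_parse_ddtp_response := by
  intro text _
  unfold Spec_parse_ddtp_response parse_ddtp_response parse_ddtp_response_alt
  have h := pvMain (PySem.Str.splitlines text) []
  rcases hst : (PySem.Str.splitlines text).foldl pvStepA ([], none) with ⟨packages, cur⟩
  rw [hst] at h
  cases cur with
  | some c =>
    simp only [pvFinish, List.nil_append] at h
    simp only [h, List.map_map]
    exact List.map_congr_left (fun g _ => pvItems g)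
  | none =>
    simp only [pvFinish, List.nil_append] at h
    simp only [h, List.map_map]
    exact List.map_congr_left (fun g _ => pvItems g)
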